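-- pv_equiv track=rewrite | github.com/stevegoldman/Just-for-Fun | element_words.py | element_words
-- ===== SOURCE A (Python) =====
-- def element_words(word,symbol_dict):
--     def ew_recursive(word_fragment,possible_solution,valid_solutions):
--         if len(word_fragment)==0:
--             valid_solutions.append(possible_solution)
--             return
--         for split in range(1,len(word_fragment)+1):
--             first,rest=word_fragment[:split],word_fragment[split:]
--             if first in symbol_dict:
--                 ew_recursive(rest,possible_solution[:]+[first],valid_solutions)
--
--     ews=[]
--     ew_recursive(word.lower(),[],ews)
--     return ews
-- ===== SOURCE B (Python) =====
-- def element_words(word, symbol_dict):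
--     w = word.lower()
--     n = len(w)
--     maxlen = 0
--     for key in symbol_dict:
--         maxlen = max(maxlen, len(key))
--     dp = [None] * n + [[[]]]
--     for i in range(n - 1, -1, -1):
--         row = []
--         for L in range(1, min(n - i, maxlen) + 1):
--             first = w[i:i+L]
--             if first in symbol_dict:
--                 for seg in dp[i + L]:
--                     row.append([first] + seg)
--         dp[i] = row
--     return dp[0]
-- ===== Notes on version B (the rewrite author's own statement) =====
-- stated objective: faster
-- what changed: Replaces A's accumulator-passing backtracking recursion with bottom-up dynamic programming over suffix positions (dp[i] = all segmentations of w[i:], filled from the end, dp[0] returned), with the inner slice length capped by the longest dictionary key.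
import Mathlib
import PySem

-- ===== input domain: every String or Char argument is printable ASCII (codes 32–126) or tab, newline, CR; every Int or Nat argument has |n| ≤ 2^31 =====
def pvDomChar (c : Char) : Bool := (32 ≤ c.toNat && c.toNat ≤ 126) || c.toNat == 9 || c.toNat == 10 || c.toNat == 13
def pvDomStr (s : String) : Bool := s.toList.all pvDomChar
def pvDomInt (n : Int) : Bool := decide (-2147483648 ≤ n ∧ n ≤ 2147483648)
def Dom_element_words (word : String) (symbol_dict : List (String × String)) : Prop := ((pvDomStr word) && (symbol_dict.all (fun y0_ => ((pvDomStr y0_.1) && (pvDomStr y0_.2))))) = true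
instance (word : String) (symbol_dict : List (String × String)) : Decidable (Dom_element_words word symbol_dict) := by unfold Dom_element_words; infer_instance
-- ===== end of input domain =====

-- B replaces A's accumulator-passing backtracking recursion by bottom-up tabulation over
-- suffix positions (dp[i] = all segmentations of w[i:], slice length capped by the longest
-- dictionary key); objective: faster (measured on a timing run's generated inputs).

-- ===== PORT A =====
-- ew_recursive: the inner `for split in range(1,len+1)` walks the fragment, moving one
-- character at a time from the remainder onto the current prefix (first = fragment[:split]).
mutual
def ewRecursive (symbol_dict : List (String × String)) (frag : List Char)
    (possible : List String) (valid : List (List String)) : List (List String) :=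
  if frag.length = 0 then valid ++ [possible]
  else ewLoop symbol_dict [] frag possible valid
termination_by 2 * frag.length + 1

def ewLoop (symbol_dict : List (String × String)) (pre rem : List Char)
    (possible : List String) (valid : List (List String)) : List (List String) :=
  match rem with
  | [] => valid
  | c :: rem' =>
    let first := pre ++ [c]
    let valid' :=
      if symbol_dict.any (fun p => p.1 == String.ofList first) then
        ewRecursive symbol_dict rem' (possible ++ [String.ofList first]) valid
      else valid
    ewLoop symbol_dict first rem' possible valid'
termination_by 2 * rem.length
decreasing_by all_goals simp <;> omega
end

def element_words (word : String) (symbol_dict : List (String × String)) : List (List String) :=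
  ewRecursive symbol_dict (PySem.Str.lower word).toList [] []

-- ===== PORT B =====
-- the longest dictionary key bounds the slice lengths worth testing
def maxKeyLen (symbol_dict : List (String × String)) : Nat :=
  symbol_dict.foldl (fun m p => max m p.1.length) 0

-- row for position i: dp[i] = concat over L = 1 .. min(n-i, maxlen) of [w[i:i+L]] + seg for seg in dp[i+L]
def buildRow (symbol_dict : List (String × String)) (cs : List Char)
    (dps : List (List (List String))) : List (List String) :=
  (List.range (min cs.length (maxKeyLen symbol_dict))).foldl
    (fun row k =>
      let first := String.ofList (cs.take (k + 1))
      if symbol_dict.any (fun p => p.1 == first) then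
        row ++ (dps.getD k []).map (fun seg => first :: seg)
      else row)
    []

-- the dp table for all suffixes, built from the end (dp[n] = [[]]) towards the front
def buildDP (symbol_dict : List (String × String)) : List Char → List (List (List String))
  | [] => [[[]]]
  | c :: rest =>
    let dps := buildDP symbol_dict rest
    buildRow symbol_dict (c :: rest) dps :: dps

def element_words_alt (word : String) (symbol_dict : List (String × String)) : List (List String) :=
  (buildDP symbol_dict (PySem.Str.lower word).toList).headD []

-- ===== PRECONDITION & SPEC =====
def Spec_element_words (word : String) (symbol_dict : List (String × String)) (out : List (List String)) : Prop := out = element_words_alt word symbol_dict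
instance (word : String) (symbol_dict : List (String × String)) (out : List (List String)) : Decidable (Spec_element_words word symbol_dict out) := by unfold Spec_element_words; infer_instance

-- ===== CLAIM (what is proved, stated in full; the proofs are below) =====
def Claim_equal_element_words : Prop := ∀ (word : String) (symbol_dict : List (String × String)), Dom_element_words word symbol_dict → Spec_element_words word symbol_dict (element_words word symbol_dict)

-- ===== LEMMAS AND PROOFS =====

-- all segmentations of cs into dictionary keys, in A's/B's common exploration order
def splits (symbol_dict : List (String × String)) (cs : List Char) : List (List String) :=
  if h : cs = [] then [[]]
  else
    (List.range cs.length).attach.flatMap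
      (fun k =>
        let first := String.ofList (cs.take (k.1 + 1))
        if symbol_dict.any (fun p => p.1 == first) then
          (splits symbol_dict (cs.drop (k.1 + 1))).map (fun seg => first :: seg)
        else [])
termination_by cs.length
decreasing_by
  simp
  cases cs with
  | nil => exact absurd rfl h
  | cons a l => simp

theorem splits_nil (sd : List (String × String)) : splits sd [] = [[]] := by
  rw [splits]; simp

theorem splits_cons (sd : List (String × String)) (c : Char) (rest : List Char) :
    splits sd (c :: rest) =
      (List.range (rest.length + 1)).flatMap
        (fun k =>
          let first := String.ofList ((c :: rest).take (k + 1))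
          if sd.any (fun p => p.1 == first) then
            (splits sd ((c :: rest).drop (k + 1))).map (fun seg => first :: seg)
          else []) := by
  rw [splits, dif_neg (by simp : ¬(c :: rest = []))]
  simp only [List.flatMap, List.length_cons]
  congr 1
  exact List.attach_map_val (l := List.range (rest.length + 1))
    (f := fun k =>
      if (sd.any fun p => p.1 == String.ofList (List.take (k + 1) (c :: rest))) = true then
        List.map (fun seg => String.ofList (List.take (k + 1) (c :: rest)) :: seg)
          (splits sd (List.drop (k + 1) (c :: rest)))
      else [])

theorem ewLoop_eq (sd : List (String × String)) :
    ∀ (rem pre : List Char) (p : List String) (v : List (List String)),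
      (∀ r p' v', r.length < pre.length + rem.length →
        ewRecursive sd r p' v' = v' ++ (splits sd r).map (fun s => p' ++ s)) →
      ewLoop sd pre rem p v =
        v ++ ((List.range rem.length).flatMap
          (fun k =>
            let first := String.ofList (pre ++ rem.take (k + 1))
            if sd.any (fun q => q.1 == first) then
              (splits sd (rem.drop (k + 1))).map (fun seg => first :: seg)
            else [])).map (fun s => p ++ s) := by
  intro rem
  induction rem with
  | nil => intro pre p v _; rw [ewLoop]; simp
  | cons c rem' ih =>
    intro pre p v hrec
    rw [ewLoop]
    simp only [List.length_cons]
    have hlen : rem'.length < pre.length + (c :: rem').length := by simp; omega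
    rw [ih (pre ++ [c]) p _ (by intro r p' v' hr; apply hrec; simp at hr ⊢; omega)]
    rw [hrec rem' (p ++ [String.ofList (pre ++ [c])]) v hlen]
    rw [List.range_succ_eq_map]
    simp only [List.flatMap_cons, List.flatMap_map, List.take_succ_cons, List.take_zero,
      List.drop_succ_cons, List.map_append]
    have hstr : ∀ X : List Char, pre ++ [c] ++ X = pre ++ c :: X := by intro X; simp
    simp only [hstr]
    split <;> simp [List.append_assoc, Function.comp]

theorem ewRecursive_eq (sd : List (String × String)) :
    ∀ (frag : List Char) (p : List String) (v : List (List String)),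
      ewRecursive sd frag p v = v ++ (splits sd frag).map (fun s => p ++ s) := by
  have aux : ∀ (n : Nat) (frag : List Char), frag.length ≤ n → ∀ p v,
      ewRecursive sd frag p v = v ++ (splits sd frag).map (fun s => p ++ s) := by
    intro n
    induction n with
    | zero =>
      intro frag hf p v
      have : frag = [] := List.length_eq_zero_iff.mp (Nat.le_zero.mp hf)
      subst this
      rw [ewRecursive]; simp [splits_nil]
    | succ n ih =>
      intro frag hf p v
      cases frag with
      | nil => rw [ewRecursive]; simp [splits_nil]
      | cons c rest =>
        rw [ewRecursive]
        simp only [List.length_cons, Nat.add_one_ne_zero, if_false]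
        rw [ewLoop_eq sd (c :: rest) [] p v
          (by intro r p' v' hr; simp at hr; exact ih r (by simp at hf; omega) p' v')]
        rw [splits_cons]
        simp only [List.nil_append, List.length_cons]
  intro frag p v
  exact aux frag.length frag (Nat.le_refl _) p v

theorem foldl_max_init_le (l : List (String × String)) :
    ∀ a : Nat, a ≤ l.foldl (fun m p => max m p.1.length) a := by
  induction l with
  | nil => intro a; simp
  | cons x xs ih =>
    intro a
    simp only [List.foldl_cons]
    exact le_trans (le_max_left a x.1.length) (ih _)

theorem le_maxKeyLen (sd : List (String × String)) (q : String × String) (hq : q ∈ sd) :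
    q.1.length ≤ maxKeyLen sd := by
  unfold maxKeyLen
  have gen : ∀ (l : List (String × String)) (a : Nat), q ∈ l →
      q.1.length ≤ l.foldl (fun m p => max m p.1.length) a := by
    intro l
    induction l with
    | nil => intro a h; cases h
    | cons x xs ih =>
      intro a h
      simp only [List.foldl_cons]
      rcases List.mem_cons.mp h with rfl | hmem
      · exact le_trans (le_max_right a q.1.length) (foldl_max_init_le xs _)
      · exact ih _ hmem
  exact gen sd 0 hq

theorem buildRow_eq (sd : List (String × String)) (c : Char) (rest : List Char)
    (dps : List (List (List String)))
    (hdps : dps = (List.range (rest.length + 1)).map (fun k => splits sd (rest.drop k))) :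
    buildRow sd (c :: rest) dps = splits sd (c :: rest) := by
  unfold buildRow
  have hf : (fun (row : List (List String)) (k : Nat) =>
      let first := String.ofList ((c :: rest).take (k + 1))
      if sd.any (fun p => p.1 == first) then
        row ++ (dps.getD k []).map (fun seg => first :: seg)
      else row)
    = fun row k => row ++
        (let first := String.ofList ((c :: rest).take (k + 1))
         if sd.any (fun p => p.1 == first) then
           (dps.getD k []).map (fun seg => first :: seg)
         else []) := by
    funext row k; simp only []; split <;> simp
  rw [hf, PySem.List.foldl_append_eq_flatMap]
  rw [splits_cons]
  simp only [List.length_cons, List.nil_append]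
  -- the tested range, padded with vanishing terms, is the full range
  set n := rest.length + 1 with hn
  set m := maxKeyLen sd with hm
  have hsplit : List.range n = List.range (min n m) ++ (List.range n).drop (min n m) := by
    conv_lhs => rw [← List.take_append_drop (min n m) (List.range n)]
    congr 1
    rw [List.take_range]
    congr 1
    omega
  rw [hsplit, List.flatMap_append]
  have hvanish : ((List.range n).drop (min n m)).flatMap
      (fun k =>
        let first := String.ofList ((c :: rest).take (k + 1))
        if sd.any (fun p => p.1 == first) then
          (splits sd ((c :: rest).drop (k + 1))).map (fun seg => first :: seg)
        else []) = [] := by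
    rw [List.flatMap_eq_nil_iff]
    intro k hk
    have hmle : min n m ≤ k := by
      obtain ⟨i, hi, rfl⟩ := List.mem_iff_getElem.mp hk
      have h1 : (List.drop (min n m) (List.range n))[i] = min n m + i := by
        rw [List.getElem_drop]
        simp
      rw [h1]
      omega
    have hklt : k < n := by
      have := List.mem_of_mem_drop hk
      simpa using this
    have hany : sd.any (fun p => p.1 == String.ofList ((c :: rest).take (k + 1))) = false := by
      rw [List.any_eq_false]
      intro q hq hbeq
      have hqeq : q.1 = String.ofList ((c :: rest).take (k + 1)) := by
        simpa using hbeq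
      have hlen1 : q.1.length = k + 1 := by
        rw [hqeq, String.length_ofList, List.length_take]
        simp only [List.length_cons, ← hn]
        omega
      have := le_maxKeyLen sd q hq
      omega
    simp only [hany]
    simp
  rw [hvanish, List.append_nil]
  apply List.flatMap_congr
  intro k hk
  simp only [List.mem_range] at hk
  have hkn : k < n := lt_of_lt_of_le hk (by omega)
  have hgd : dps.getD k [] = splits sd ((c :: rest).drop (k + 1)) := by
    subst hdps
    simp [List.getD_eq_getElem?_getD, hkn, List.drop_succ_cons]
  rw [hgd]

theorem buildDP_eq (sd : List (String × String)) (cs : List Char) :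
    buildDP sd cs = (List.range (cs.length + 1)).map (fun k => splits sd (cs.drop k)) := by
  induction cs with
  | nil => simp [buildDP, splits_nil]
  | cons c rest ih =>
    rw [buildDP]
    simp only [List.length_cons]
    rw [List.range_succ_eq_map]
    simp only [List.map_cons, List.map_map, List.drop_zero]
    rw [buildRow_eq sd c rest _ ih, ih]
    simp [Function.comp_def, List.drop_succ_cons]

-- ===== VERDICT (by name: the statement is the Claim_ definition above) =====
theorem element_words_spec : Claim_equal_element_words := by
  intro word sd _
  unfold Spec_element_words element_words element_words_alt
  rw [ewRecursive_eq, buildDP_eq]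
  simp [List.range_succ_eq_map]
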